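-- pv_equiv track=rewrite | github.com/gdleonberg/Embedded-TA | Lab 5/AssemblerPython/gasm.py | dataLabels
-- ===== SOURCE A (Python) =====
-- def dataLabels(dataLines):
--
-- 	labels = {}
-- 	counter = 0
-- 	for line in dataLines:
-- 		tag = line.split(':')[0]
-- 		rest = line.split(':')[1]
-- 		typ = rest.split()[0]
-- 		val = rest.split(typ)[1].strip()
--
-- 		if typ == 'str':
-- 			val = val.split('"')[1]
-- 			val = val.split('"')[0]
--
-- 		labels[tag] = dec2bin(counter, 16)
-- 		if typ == 'str':
-- 			counter = counter + len(val) + 1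
-- 		else:
-- 			counter = counter + 1
-- 	return labels
--
-- def dec2bin(num, digits):
-- 	ret = bin(num)
-- 	ret = ret[2:]
-- 	ret = ret.zfill(digits)
-- 	return ret
-- ===== SOURCE B (Python) =====
-- def dataLabels(dataLines):
--     # Pass 1: parse every line into (tag, size).
--     entries = [_entry(line) for line in dataLines]
--     # Pass 2: running offsets = prefix sums of the sizes (offset i = sum of earlier sizes).
--     offsets = []
--     total = 0
--     for _, size in entries:
--         offsets.append(total)
--         total += size
--     # Pass 3: build the label map from tags paired with their offsets (last wins on duplicates).
--     labels = {}
--     for (tag, _), off in zip(entries, offsets):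
--         labels[tag] = format(off, 'b').zfill(16)
--     return labels
--
-- def _entry(line):
--     parts = line.split(':')
--     tag = parts[0]
--     rest = parts[1]
--     typ = rest.split()[0]
--     val = rest.split(typ)[1].strip()
--     if typ == 'str':
--         val = val.split('"')[1]
--         val = val.split('"')[0]
--         size = len(val) + 1
--     else:
--         size = 1
--     return tag, size
-- ===== Notes on version B (the rewrite author's own statement) =====
-- stated objective: alternative
-- what changed: A interleaves parsing, offset counting and dict building in one accumulator loop; B makes three separate passes: parse each line to a (tag, size) pair, compute running offsets as a prefix sum of the sizes, then build the dict by zipping tags with their offsets.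
import Mathlib
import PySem

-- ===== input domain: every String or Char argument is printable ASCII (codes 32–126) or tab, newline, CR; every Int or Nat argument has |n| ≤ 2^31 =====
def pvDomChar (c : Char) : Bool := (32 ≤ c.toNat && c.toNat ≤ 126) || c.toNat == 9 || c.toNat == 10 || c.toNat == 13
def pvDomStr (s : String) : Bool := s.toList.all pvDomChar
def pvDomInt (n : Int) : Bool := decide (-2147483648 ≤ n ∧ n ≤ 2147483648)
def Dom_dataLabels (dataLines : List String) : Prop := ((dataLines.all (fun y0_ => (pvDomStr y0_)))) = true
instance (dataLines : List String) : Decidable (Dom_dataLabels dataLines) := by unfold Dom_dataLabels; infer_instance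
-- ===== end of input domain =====

-- B replaces A's single accumulator loop by three passes (parse to (tag,size), prefix-sum offsets, dict build); equal returns proved on Pre_.

-- ===== PORT A =====
-- A's loop body, named: state = (labels dict, counter)
def pvStepA (st : PySem.Dict String String × Int) (line : String) : PySem.Dict String String × Int :=
      let labels := st.1
      let counter := st.2
      let tag := (PySem.Str.split? line ":").getD [] |>.getD 0 ""
      let rest := (PySem.Str.split? line ":").getD [] |>.getD 1 ""
      let typ := (PySem.Str.split₀ rest).getD 0 ""
      let val := PySem.Str.strip (((PySem.Str.split? rest typ).getD []).getD 1 "")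
      let val := if typ == "str" then
          let v := ((PySem.Str.split? val "\"").getD []).getD 1 ""
          ((PySem.Str.split? v "\"").getD []).getD 0 ""
        else val
      let labels := labels.insert tag (PySem.Str.zfill (PySem.Str.slice (PySem.Int.pyBin counter) (some 2) none) 16)
      let counter := if typ == "str" then counter + PySem.Str.len val + 1 else counter + 1
      (labels, counter)

def dataLabels (dataLines : List String) : List (String × String) :=
  (dataLines.foldl pvStepA (PySem.Dict.empty, 0)).1.items

-- ===== PORT B =====
-- per-line parse of Source B's _entry: (tag, size)
def pvEntry (line : String) : String × Int :=
  let parts := (PySem.Str.split? line ":").getD []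
  let tag := parts.getD 0 ""
  let rest := parts.getD 1 ""
  let typ := (PySem.Str.split₀ rest).getD 0 ""
  let val := PySem.Str.strip (((PySem.Str.split? rest typ).getD []).getD 1 "")
  if typ == "str" then
    let val := ((PySem.Str.split? val "\"").getD []).getD 1 ""
    let val := ((PySem.Str.split? val "\"").getD []).getD 0 ""
    (tag, PySem.Str.len val + 1)
  else
    (tag, 1)

def dataLabels_alt (dataLines : List String) : List (String × String) :=
  let entries := dataLines.map pvEntry
  let offsets := (entries.foldl (fun (st : List Int × Int) p => (st.1 ++ [st.2], st.2 + p.2)) (([] : List Int), (0 : Int))).1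
  ((entries.zip offsets).foldl
      (fun (labels : PySem.Dict String String) pr => labels.insert pr.1.1 (PySem.Str.zfill (PySem.Int.toBin pr.2) 16))
      PySem.Dict.empty).items

-- ===== PRECONDITION & SPEC =====
-- Pre_ excludes exactly the lines on which the Python A raises IndexError: a line with no ':',
-- a line whose text after the first ':' has no non-whitespace token, or a 'str' line whose value has no '"'.
def pvLineOK (line : String) : Bool :=
  let parts := (PySem.Str.split? line ":").getD []
  decide (2 ≤ parts.length) &&
    (let rest := parts.getD 1 ""
     let ws := PySem.Str.split₀ rest
     !ws.isEmpty &&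
       (let typ := ws.getD 0 ""
        typ != "str" ||
          decide (2 ≤ (((PySem.Str.split? (PySem.Str.strip (((PySem.Str.split? rest typ).getD []).getD 1 "")) "\"").getD []).length))))

def Pre_dataLabels (dataLines : List String) : Prop := dataLines.all pvLineOK = true
instance (dataLines : List String) : Decidable (Pre_dataLabels dataLines) := by unfold Pre_dataLabels; infer_instance

def pvWitness_dataLabels : List String := ["msg: str \"hi\"", "x: int 5", "msg: word 3"]

def Spec_dataLabels (dataLines : List String) (out : List (String × String)) : Prop := out = dataLabels_alt dataLines
instance (dataLines : List String) (out : List (String × String)) : Decidable (Spec_dataLabels dataLines out) := by unfold Spec_dataLabels; infer_instance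

-- ===== CLAIM (what is proved, stated in full; the proofs are below) =====
def Claim_equal_dataLabels : Prop := ∀ (dataLines : List String), Dom_dataLabels dataLines → Pre_dataLabels dataLines → Spec_dataLabels dataLines (dataLabels dataLines)

-- ===== LEMMAS AND PROOFS =====

-- canonical recursion both ports are reduced to
def pvSpecFold (ls : List String) (d : PySem.Dict String String) (c : Int) : PySem.Dict String String :=
  match ls with
  | [] => d
  | l :: ls =>
      pvSpecFold ls (d.insert (pvEntry l).1 (PySem.Str.zfill (PySem.Int.toBin c) 16)) (c + (pvEntry l).2)

lemma pvBin_slice (c : Int) (h : 0 ≤ c) :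
    PySem.Str.slice (PySem.Int.pyBin c) (some 2) none = PySem.Int.toBin c := by
  apply String.ext
  rw [PySem.Str.toList_slice, PySem.Int.toList_toBin, PySem.Int.toList_pyBin]
  show PySem.List.slice _ _ _ = _
  rw [PySem.List.slice_from _ (by omega : (0:Int) ≤ 2)]
  simp [PySem.Int.toBinChars0b, PySem.Int.toBinChars, not_lt.mpr h]

lemma pvEntry_size_pos (l : String) : 1 ≤ (pvEntry l).2 := by
  unfold pvEntry
  dsimp only
  split
  · simp only [PySem.Str.len_eq]; omega
  · omega

lemma pvStepA_eq (l : String) (d : PySem.Dict String String) (c : Int) (hc : 0 ≤ c) :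
    pvStepA (d, c) l = (d.insert (pvEntry l).1 (PySem.Str.zfill (PySem.Int.toBin c) 16), c + (pvEntry l).2) := by
  unfold pvStepA pvEntry
  dsimp only
  rw [pvBin_slice c hc]
  cases h : ((PySem.Str.split₀ (((PySem.Str.split? l ":").getD []).getD 1 "")).getD 0 "") == "str" with
  | false => simp only [h, Bool.false_eq_true, if_false]
  | true => simp only [h, if_true, add_assoc]

lemma pvFoldA_eq_specFold (ls : List String) (d : PySem.Dict String String) (c : Int) (hc : 0 ≤ c) :
    (ls.foldl pvStepA (d, c)).1 = pvSpecFold ls d c := by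
  induction ls generalizing d c with
  | nil => rfl
  | cons l ls ih =>
      rw [List.foldl_cons, pvStepA_eq l d c hc]
      simp only [pvSpecFold]
      exact ih _ _ (by have := pvEntry_size_pos l; omega)

-- B's offset pass produces the prefix sums starting from the accumulator's counter
def pvOffsets (es : List (String × Int)) (c : Int) : List Int :=
  match es with
  | [] => []
  | e :: es => c :: pvOffsets es (c + e.2)

lemma pvOffsets_foldl (es : List (String × Int)) (acc : List Int) (c : Int) :
    (es.foldl (fun (st : List Int × Int) p => (st.1 ++ [st.2], st.2 + p.2)) (acc, c)).1
      = acc ++ pvOffsets es c := by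
  induction es generalizing acc c with
  | nil => simp [pvOffsets]
  | cons e es ih => simp [pvOffsets, ih, List.append_assoc]

lemma pvZipFold_eq_specFold (ls : List String) (d : PySem.Dict String String) (c : Int) :
    ((ls.map pvEntry).zip (pvOffsets (ls.map pvEntry) c)).foldl
      (fun (labels : PySem.Dict String String) pr => labels.insert pr.1.1 (PySem.Str.zfill (PySem.Int.toBin pr.2) 16)) d
      = pvSpecFold ls d c := by
  induction ls generalizing d c with
  | nil => rfl
  | cons l ls ih => simp only [List.map_cons, pvOffsets, List.zip_cons_cons, List.foldl_cons, pvSpecFold, ih]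

-- ===== VERDICT (by name: the statement is the Claim_ definition above) =====
theorem dataLabels_spec : Claim_equal_dataLabels := by
  intro dataLines _ _
  show dataLabels dataLines = dataLabels_alt dataLines
  unfold dataLabels dataLabels_alt
  dsimp only
  rw [pvFoldA_eq_specFold dataLines PySem.Dict.empty 0 le_rfl,
    pvOffsets_foldl _ [] 0, List.nil_append, pvZipFold_eq_specFold]
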